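-- pv_equiv track=rewrite | github.com/nacho-bytes/upv_gii | 4r/1r Quatrimestre/ALT/alt_backtracking-main/langford.py | langford
-- ===== SOURCE A (Python) =====
-- def langford(N):
--     N2   = 2*N
--     seq  = [0]*N2
--     def backtracking(num):
--         # Caso base ya tenemos todos
--         # los números en seq[]
--         if num<=0:
--             yield "-".join(map(str, seq))
--         else:
--             # Para todas las posiciones posibles
--             for indx, val in enumerate(seq):
--                 secondPos = indx + num + 1
--                 # Miramos las válidas
--                 if secondPos < N2 and\
--                     val == 0 and seq[secondPos] == 0:
--                         # Añadimos y continuamos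
--                         seq[indx] = num; seq[secondPos] = num
--                         yield from backtracking(num - 1)
--                         # Volvemos atrás
--                         seq[indx] = 0; seq[secondPos] = 0
--     if N%4 in (0,3):
--         yield from backtracking(N)
-- ===== SOURCE B (Python) =====
-- def langford(N):
--     # Pure recursion over immutable solution states: collects the solved
--     # sequences as lists and joins them at the top, instead of A's shared
--     # mutable array with place/undo inside a nested generator.
--     N2 = 2 * N
--     if N % 4 not in (0, 3):
--         return
--     def solve(num, seq):
--         if num <= 0:
--             return [seq]
--         sols = []
--         for i in range(N2 - num - 1):
--             if seq[i] == 0 and seq[i + num + 1] == 0: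
--                 child = seq.copy()
--                 child[i] = num
--                 child[i + num + 1] = num
--                 sols += solve(num - 1, child)
--         return sols
--     for sol in solve(N, [0] * N2):
--         yield "-".join(map(str, sol))
-- ===== Notes on version B (the rewrite author's own statement) =====
-- stated objective: alternative
-- what changed: The nested generator mutating one shared seq array with place/undo is replaced by a pure recursion over immutable per-call sequences that returns the list of solved sequences, joined to strings only at the top level; candidate positions come from range(2N-num-1) instead of enumerate-plus-bound-check.
import Mathlib
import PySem

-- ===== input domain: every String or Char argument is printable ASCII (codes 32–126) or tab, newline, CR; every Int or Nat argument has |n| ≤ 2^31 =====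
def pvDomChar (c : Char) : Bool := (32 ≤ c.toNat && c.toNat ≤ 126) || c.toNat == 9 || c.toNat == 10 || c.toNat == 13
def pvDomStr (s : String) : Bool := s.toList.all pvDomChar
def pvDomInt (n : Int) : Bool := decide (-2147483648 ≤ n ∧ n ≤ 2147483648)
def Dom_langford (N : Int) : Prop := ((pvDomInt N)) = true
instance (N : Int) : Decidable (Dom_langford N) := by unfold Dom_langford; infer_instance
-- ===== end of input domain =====

-- B replaces A's shared mutable array with place/undo by a pure recursion returning
-- the list of solved sequences, joined to strings at the top (alternative decomposition,
-- same search); both are generators in Python, the equivalence is about the yielded list.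

-- "-".join(map(str, seq))
def pvJoin (seq : List Int) : String := PySem.Str.join "-" (seq.map PySem.Int.toStr)

-- ===== PORT A =====
-- 'for indx, val in enumerate(seq)' iterates the LIVE list; every mutation is undone
-- before the loop advances, so iterating the indices and reading the current threaded
-- seq at indx is exact. The inner for-loop is the structural recursion langfordLoop,
-- which receives the recursive generator call for num-1 as the function 'back'.
def langfordLoop (N2 num : Int) (back : List Int → List String) :
    List Int → List Int → List String → List Int × List String
  | [], seq, acc => (seq, acc)
  | indx :: rest, seq, acc =>
    let secondPos := indx + num + 1
    if secondPos < N2 ∧ PySem.List.pyGet? seq indx = some 0 ∧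
        PySem.List.pyGet? seq secondPos = some 0 then
      let seq1 := (seq.set indx.toNat num).set secondPos.toNat num
      let ys := back seq1
      let seq2 := (seq1.set indx.toNat 0).set secondPos.toNat 0
      langfordLoop N2 num back rest seq2 (acc ++ ys)
    else langfordLoop N2 num back rest seq acc

def langfordBack (N2 : Int) (num : Int) (seq : List Int) : List String :=
  if num ≤ 0 then [pvJoin seq]
  else (langfordLoop N2 num (fun s => langfordBack N2 (num - 1) s)
      (PySem.List.pyRange 0 N2 1) seq []).2
termination_by num.toNat
decreasing_by omega

def langford (N : Int) : List String :=
  let N2 := 2 * N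
  let seq : List Int := List.replicate N2.toNat 0
  if PySem.Int.mod N 4 = 0 ∨ PySem.Int.mod N 4 = 3 then langfordBack N2 N seq
  else []

-- ===== PORT B =====
-- the inner for-loop of solve, structural on the candidate positions
def langfordGo (num : Int) (solve : List Int → List (List Int)) :
    List Int → List Int → List (List Int)
  | [], _ => []
  | i :: rest, seq =>
    (if PySem.List.pyGet? seq i = some 0 ∧ PySem.List.pyGet? seq (i + num + 1) = some 0 then
       solve ((seq.set i.toNat num).set (i + num + 1).toNat num)
     else []) ++ langfordGo num solve rest seq

def langfordSolve (N2 : Int) (num : Int) (seq : List Int) : List (List Int) :=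
  if num ≤ 0 then [seq]
  else langfordGo num (fun s => langfordSolve N2 (num - 1) s)
      (PySem.List.pyRange 0 (N2 - num - 1) 1) seq
termination_by num.toNat
decreasing_by omega

def langford_alt (N : Int) : List String :=
  let N2 := 2 * N
  if PySem.Int.mod N 4 = 0 ∨ PySem.Int.mod N 4 = 3 then
    (langfordSolve N2 N (List.replicate N2.toNat 0)).map pvJoin
  else []

-- ===== PRECONDITION & SPEC =====
def Spec_langford (N : Int) (out : List String) : Prop := out = langford_alt N
instance (N : Int) (out : List String) : Decidable (Spec_langford N out) := by unfold Spec_langford; infer_instance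

-- ===== CLAIM (what is proved, stated in full; the proofs are below) =====
def Claim_equal_langford : Prop := ∀ (N : Int), Dom_langford N → Spec_langford N (langford N)

-- ===== LEMMAS AND PROOFS =====

theorem pvRestore (l : List Int) (i j v w : Int) (hi : 0 ≤ i) (hj : 0 ≤ j)
    (h1 : PySem.List.pyGet? l i = some 0) (h2 : PySem.List.pyGet? l j = some 0) :
    (((l.set i.toNat v).set j.toNat w).set i.toNat 0).set j.toNat 0 = l := by
  rw [PySem.List.pyGet?_of_nonneg l hi] at h1
  rw [PySem.List.pyGet?_of_nonneg l hj] at h2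
  apply List.ext_getElem?
  intro k
  simp only [List.getElem?_set]
  split_ifs <;> simp_all

theorem pvGoFlat (num : Int) (solve : List Int → List (List Int)) (idxs : List Int)
    (seq : List Int) :
    langfordGo num solve idxs seq =
      idxs.flatMap (fun i =>
        if PySem.List.pyGet? seq i = some 0 ∧ PySem.List.pyGet? seq (i + num + 1) = some 0 then
          solve ((seq.set i.toNat num).set (i + num + 1).toNat num)
        else []) := by
  induction idxs with
  | nil => simp [langfordGo]
  | cons i rest ih => simp only [langfordGo, ih, List.flatMap_cons]

theorem pvLoopEq (N2 num : Int) (back : List Int → List String)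
    (solve : List Int → List (List Int))
    (IH : ∀ seq, back seq = (solve seq).map pvJoin)
    (idxs : List Int) (hpos : ∀ i ∈ idxs, 0 ≤ i) (hnum : 0 < num) :
    ∀ (seq : List Int) (acc : List String),
    langfordLoop N2 num back idxs seq acc =
      (seq, acc ++ (idxs.flatMap (fun i =>
        if i + num + 1 < N2 ∧ PySem.List.pyGet? seq i = some 0 ∧
            PySem.List.pyGet? seq (i + num + 1) = some 0 then
          solve ((seq.set i.toNat num).set (i + num + 1).toNat num)
        else [])).map pvJoin) := by
  induction idxs with
  | nil => intro seq acc; simp [langfordLoop]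
  | cons indx rest ih =>
    intro seq acc
    have hindx : 0 ≤ indx := hpos indx (by simp)
    have hrest : ∀ i ∈ rest, 0 ≤ i := fun i hi => hpos i (by simp [hi])
    rw [langfordLoop]
    by_cases hg : indx + num + 1 < N2 ∧ PySem.List.pyGet? seq indx = some 0 ∧
        PySem.List.pyGet? seq (indx + num + 1) = some 0
    · rw [if_pos hg]
      dsimp only
      have hres : ((((seq.set indx.toNat num).set (indx + num + 1).toNat num).set indx.toNat 0).set
          (indx + num + 1).toNat 0) = seq :=
        pvRestore seq indx (indx + num + 1) num num hindx (by omega) hg.2.1 hg.2.2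
      rw [hres, ih hrest, IH]
      simp [hg, List.flatMap_cons, List.append_assoc]
    · rw [if_neg hg, ih hrest]
      simp [List.flatMap_cons, if_neg hg]

theorem pvRangeEq (N2 num : Int) (solve : List Int → List (List Int)) (h : 0 < num)
    (seq : List Int) :
    (PySem.List.pyRange 0 N2 1).flatMap (fun i =>
        if i + num + 1 < N2 ∧ PySem.List.pyGet? seq i = some 0 ∧
            PySem.List.pyGet? seq (i + num + 1) = some 0 then
          solve ((seq.set i.toNat num).set (i + num + 1).toNat num)
        else []) =
      (PySem.List.pyRange 0 (N2 - num - 1) 1).flatMap (fun i =>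
        if PySem.List.pyGet? seq i = some 0 ∧ PySem.List.pyGet? seq (i + num + 1) = some 0 then
          solve ((seq.set i.toNat num).set (i + num + 1).toNat num)
        else []) := by
  by_cases ha : N2 - num - 1 ≤ 0
  · conv_rhs => rw [PySem.List.pyRange_one_eq_nil (a := 0) (b := N2 - num - 1) (by omega)]
    rw [List.flatMap_nil]
    rw [List.flatMap_eq_nil_iff]
    intro i hi
    have := (PySem.List.mem_pyRange_one).mp hi
    rw [if_neg (by omega)]
  · rw [PySem.List.pyRange_one_append 0 (N2 - num - 1) N2 (by omega) (by omega),
      List.flatMap_append]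
    have h2 : (PySem.List.pyRange (N2 - num - 1) N2 1).flatMap (fun i =>
        if i + num + 1 < N2 ∧ PySem.List.pyGet? seq i = some 0 ∧
            PySem.List.pyGet? seq (i + num + 1) = some 0 then
          solve ((seq.set i.toNat num).set (i + num + 1).toNat num)
        else []) = [] := by
      rw [List.flatMap_eq_nil_iff]
      intro i hi
      have := (PySem.List.mem_pyRange_one).mp hi
      rw [if_neg (by omega)]
    rw [h2, List.append_nil]
    apply List.flatMap_congr
    intro i hi
    have := (PySem.List.mem_pyRange_one).mp hi
    have hlt : i + num + 1 < N2 := by omega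
    by_cases hc : PySem.List.pyGet? seq i = some 0 ∧ PySem.List.pyGet? seq (i + num + 1) = some 0
    · rw [if_pos ⟨hlt, hc.1, hc.2⟩, if_pos hc]
    · rw [if_neg (by tauto), if_neg hc]

theorem pvBackEq (n : Nat) : ∀ (num : Int), num.toNat ≤ n → ∀ (N2 : Int) (seq : List Int),
    langfordBack N2 num seq = (langfordSolve N2 num seq).map pvJoin := by
  induction n with
  | zero =>
    intro num hn N2 seq
    have hnum : num ≤ 0 := by omega
    rw [langfordBack, langfordSolve, if_pos hnum, if_pos hnum]
    simp
  | succ m ih =>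
    intro num hn N2 seq
    by_cases hnum : num ≤ 0
    · rw [langfordBack, langfordSolve, if_pos hnum, if_pos hnum]
      simp
    · rw [langfordBack, langfordSolve, if_neg hnum, if_neg hnum]
      have hIH : ∀ seq, langfordBack N2 (num - 1) seq =
          (langfordSolve N2 (num - 1) seq).map pvJoin :=
        fun seq => ih (num - 1) (by omega) N2 seq
      rw [pvLoopEq N2 num _ (fun s => langfordSolve N2 (num - 1) s) hIH _
        (fun i hi => ((PySem.List.mem_pyRange_one).mp hi).1) (by omega)]
      rw [pvRangeEq N2 num _ (by omega), ← pvGoFlat]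
      simp

-- ===== VERDICT (by name: the statement is the Claim_ definition above) =====
theorem langford_spec : Claim_equal_langford := by
  intro N _
  unfold Spec_langford langford langford_alt
  split
  · exact pvBackEq N.toNat N le_rfl _ _
  · rfl
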